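-- pv_equiv track=rewrite | github.com/201560543/zappo | preprocessor/utils.py | prefix_dictionary_search
-- ===== SOURCE A (Python) =====
-- from typing import Dict, List
--
-- def find(s: str, ch: str) -> List:
-- 	"""
-- 	Utility function to find all indexes of a character in a string
-- 	"""
-- 	return [i for i, ltr in enumerate(s) if ltr == ch]
--
-- def prefix_search(prefix: str, template_data: Dict) -> List:
-- 	return [(key, val) for key, val in template_data.items()
--                    if key.startswith(prefix)]
--
-- def prefix_dictionary_search(key: str, template_data: Dict) -> str:
-- 	"""
-- 	Checks which key matches with present json
-- 	"""
-- 	find_all_spaces = find(key, ' ')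
--
-- 	find_all_spaces.append(len(key))
--
-- 	for index in find_all_spaces:
-- 		prefix = key[:index]
--
-- 		matched_items = prefix_search(prefix, template_data)
--
-- 		if len(matched_items) == 1:
-- 			return matched_items[0][1]
--
-- 	return ''
-- ===== SOURCE B (Python) =====
-- def prefix_dictionary_search(key, template_data):
--     """
--     Same result as A, but keeps one shrinking candidate list instead of
--     re-scanning the whole dictionary for every prefix.
--     """
--     cands = list(template_data.items())
--     cuts = [i for i, c in enumerate(key) if c == ' ']
--     cuts.append(len(key))
--     for i in cuts:
--         p = key[:i]
--         cands = [kv for kv in cands if kv[0].startswith(p)]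
--         if len(cands) == 1:
--             return cands[0][1]
--     return ''
-- ===== Notes on version B (the rewrite author's own statement) =====
-- stated objective: alternative
-- what changed: Instead of re-filtering the full dictionary for every space-delimited prefix, B filters one progressively shrinking candidate list (valid because each prefix extends the previous one, so matches of a longer prefix are matches of the shorter).
import Mathlib
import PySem

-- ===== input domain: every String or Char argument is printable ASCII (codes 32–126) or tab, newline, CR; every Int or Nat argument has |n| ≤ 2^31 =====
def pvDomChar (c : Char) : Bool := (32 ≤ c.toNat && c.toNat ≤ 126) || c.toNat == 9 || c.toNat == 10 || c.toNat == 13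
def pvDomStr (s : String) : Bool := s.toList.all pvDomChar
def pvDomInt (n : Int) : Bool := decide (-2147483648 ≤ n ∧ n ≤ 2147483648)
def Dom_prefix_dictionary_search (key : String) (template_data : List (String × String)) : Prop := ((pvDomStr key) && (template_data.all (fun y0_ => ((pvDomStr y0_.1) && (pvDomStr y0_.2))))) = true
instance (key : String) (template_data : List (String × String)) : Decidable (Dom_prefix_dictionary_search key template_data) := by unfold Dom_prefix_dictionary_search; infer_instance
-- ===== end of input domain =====

-- B keeps one progressively shrinking candidate list instead of re-filtering the whole
-- dictionary for every space-delimited prefix (alternative decomposition, same results).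

-- ===== PORT A =====
-- find(s, ch): all indexes of ch in s
def pvFind (s : String) (ch : String) : List Int :=
  ((PySem.List.enumerate s.toList 0).filter (fun p => String.ofList [p.2] == ch)).map (·.1)

-- prefix_search(prefix, template_data)
def pvPrefixSearch (pre : String) (template_data : List (String × String)) : List (String × String) :=
  template_data.filter (fun kv => PySem.Str.startswith kv.1 pre)

-- the 'for index in find_all_spaces' loop with its early return
def pvLoopA (key : String) (td : List (String × String)) : List Int → String
  | [] => ""
  | index :: rest =>
    let pre := PySem.Str.slice key none (some index)
    let matched := pvPrefixSearch pre td
    if matched.length == 1 then (matched.headD ("", "")).2 else pvLoopA key td rest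

def prefix_dictionary_search (key : String) (template_data : List (String × String)) : String :=
  pvLoopA key template_data (pvFind key " " ++ [PySem.Str.len key])

-- ===== PORT B =====
-- the narrowing loop: filter the surviving candidates by the next prefix
def pvNarrowLoop (key : String) : List (String × String) → List Int → String
  | _, [] => ""
  | cands, i :: rest =>
    let p := PySem.Str.slice key none (some i)
    let cands' := cands.filter (fun kv => PySem.Str.startswith kv.1 p)
    if cands'.length == 1 then (cands'.headD ("", "")).2 else pvNarrowLoop key cands' rest

def prefix_dictionary_search_alt (key : String) (template_data : List (String × String)) : String :=
  let cuts := ((PySem.List.enumerate key.toList 0).filter (fun p => String.ofList [p.2] == " ")).map (·.1)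
    ++ [PySem.Str.len key]
  pvNarrowLoop key template_data cuts

-- ===== PRECONDITION & SPEC =====
def Spec_prefix_dictionary_search (key : String) (template_data : List (String × String)) (out : String) : Prop := out = prefix_dictionary_search_alt key template_data
instance (key : String) (template_data : List (String × String)) (out : String) : Decidable (Spec_prefix_dictionary_search key template_data out) := by unfold Spec_prefix_dictionary_search; infer_instance

-- ===== CLAIM (what is proved, stated in full; the proofs are below) =====
def Claim_equal_prefix_dictionary_search : Prop := ∀ (key : String) (template_data : List (String × String)), Dom_prefix_dictionary_search key template_data → Spec_prefix_dictionary_search key template_data (prefix_dictionary_search key template_data)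

-- ===== LEMMAS AND PROOFS =====

-- a match of the longer prefix key[:i] is a match of the shorter prefix key[:n]
lemma pv_startswith_mono (key s : String) (n i : Int) (h0 : 0 ≤ n) (hni : n ≤ i)
    (h : PySem.Str.startswith s (PySem.Str.slice key none (some i)) = true) :
    PySem.Str.startswith s (PySem.Str.slice key none (some n)) = true := by
  have h0i : (0:Int) ≤ i := le_trans h0 hni
  have hs := h
  rw [show PySem.Str.startswith s (PySem.Str.slice key none (some i))
        = PySem.Chars.startswith s.toList (PySem.Str.slice key none (some i)).toList from by
      simp] at hs
  rw [show PySem.Str.startswith s (PySem.Str.slice key none (some n))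
        = PySem.Chars.startswith s.toList (PySem.Str.slice key none (some n)).toList from by
      simp]
  rw [PySem.Chars.startswith_iff] at hs ⊢
  rw [PySem.Str.toList_slice] at hs ⊢
  rw [PySem.Chars.slice_eq_listSlice] at hs ⊢
  rw [PySem.List.slice_to _ h0] at *
  rw [PySem.List.slice_to _ h0i] at hs
  refine List.IsPrefix.trans ?_ hs
  have : key.toList.take n.toNat = (key.toList.take i.toNat).take n.toNat := by
    rw [List.take_take, Nat.min_eq_left (by omega : n.toNat ≤ i.toNat)]
  rw [this]
  exact List.take_prefix _ _

-- narrowing the already-narrowed candidates equals filtering the full dictionary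
lemma pv_narrow_step (key : String) (td : List (String × String)) (n i : Int)
    (h0 : 0 ≤ n) (hni : n ≤ i) :
    (pvPrefixSearch (PySem.Str.slice key none (some n)) td).filter
        (fun kv => PySem.Str.startswith kv.1 (PySem.Str.slice key none (some i)))
      = pvPrefixSearch (PySem.Str.slice key none (some i)) td := by
  unfold pvPrefixSearch
  rw [List.filter_filter]
  apply List.filter_congr
  intro kv _
  cases h : PySem.Str.startswith kv.1 (PySem.Str.slice key none (some i)) with
  | true =>
    simp only [Bool.true_and]
    exact pv_startswith_mono key kv.1 n i h0 hni h
  | false => simp only [Bool.false_and]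

-- the narrowing loop started from the n-filtered dictionary equals A's loop,
-- provided every remaining cut is at least n
lemma pv_narrow_eq_loopA (key : String) (td : List (String × String)) :
    ∀ (l : List Int), l.Pairwise (· ≤ ·) → ∀ (n : Int), 0 ≤ n → (∀ i ∈ l, n ≤ i) →
    pvNarrowLoop key (pvPrefixSearch (PySem.Str.slice key none (some n)) td) l
      = pvLoopA key td l := by
  intro l
  induction l with
  | nil => intro _ n _ _; simp [pvNarrowLoop, pvLoopA]
  | cons i rest ih =>
    intro hpw n h0 hle
    have hni : n ≤ i := hle i (by simp)
    have h0i : (0:Int) ≤ i := le_trans h0 hni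
    simp only [pvNarrowLoop, pvLoopA]
    rw [pv_narrow_step key td n i h0 hni]
    split
    · rfl
    · exact ih (List.Pairwise.of_cons hpw) i h0i
        (fun j hj => List.rel_of_pairwise_cons hpw hj)

-- filtering by the empty prefix key[:0] keeps everything
lemma pv_filter_zero (key : String) (td : List (String × String)) :
    pvPrefixSearch (PySem.Str.slice key none (some 0)) td = td := by
  unfold pvPrefixSearch
  apply List.filter_eq_self.mpr
  intro kv _
  rw [show PySem.Str.startswith kv.1 (PySem.Str.slice key none (some 0))
        = PySem.Chars.startswith kv.1.toList (PySem.Str.slice key none (some 0)).toList from by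
      simp]
  rw [PySem.Chars.startswith_iff, PySem.Str.toList_slice, PySem.Chars.slice_eq_listSlice,
      PySem.List.slice_to _ (by norm_num : (0:Int) ≤ 0)]
  simp

-- the cut list (space positions then len) is nondecreasing and nonnegative
lemma pv_cuts_pairwise (key : String) (ch : String) :
    (pvFind key ch ++ [PySem.Str.len key]).Pairwise (· ≤ ·) := by
  unfold pvFind
  rw [List.pairwise_append]
  refine ⟨?_, by simp, ?_⟩
  · apply List.Pairwise.map
    · exact fun {p q} h => le_of_lt h
    · exact List.Pairwise.filter _ (PySem.List.pairwise_lt_enumerate key.toList 0)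
  · intro i hi j hj
    simp only [List.mem_map, List.mem_filter] at hi
    obtain ⟨p, ⟨hpmem, _⟩, rfl⟩ := hi
    rw [PySem.List.mem_enumerate_iff] at hpmem
    obtain ⟨k, hk, rfl⟩ := hpmem
    simp only [List.mem_singleton] at hj
    subst hj
    rw [PySem.Str.len_eq]
    simp only [zero_add]
    exact_mod_cast le_of_lt hk

lemma pv_cuts_nonneg (key : String) (ch : String) :
    ∀ i ∈ pvFind key ch ++ [PySem.Str.len key], (0:Int) ≤ i := by
  intro i hi
  rcases List.mem_append.mp hi with h | h
  · unfold pvFind at h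
    simp only [List.mem_map, List.mem_filter] at h
    obtain ⟨p, ⟨hpmem, _⟩, rfl⟩ := h
    rw [PySem.List.mem_enumerate_iff] at hpmem
    obtain ⟨k, hk, rfl⟩ := hpmem
    simp
  · simp only [List.mem_singleton] at h
    subst h
    rw [PySem.Str.len_eq]
    exact_mod_cast Nat.zero_le _

-- ===== VERDICT (by name: the statement is the Claim_ definition above) =====
theorem prefix_dictionary_search_spec : Claim_equal_prefix_dictionary_search := by
  intro key td _
  show prefix_dictionary_search key td = prefix_dictionary_search_alt key td
  have h := pv_narrow_eq_loopA key td (pvFind key " " ++ [PySem.Str.len key])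
    (pv_cuts_pairwise key " ") 0 le_rfl (pv_cuts_nonneg key " ")
  rw [pv_filter_zero] at h
  exact h.symm
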